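-- pv_equiv track=rewrite | github.com/Yankovsky/yandex-algos-training | hw5/j_optimized_hashing.py | triangles
-- ===== SOURCE A (Python) =====
-- from collections import defaultdict
--
-- SHIFT = 2 * 10 ** 9 + 1
--
-- def triangles(points):
--     triangles_count = 0
--     for (x1, y1) in points:
--         opposite_vectors_xy_product = set()
--         points_by_distances = defaultdict(int)
--         for x2, y2 in points:
--             x = x2 - x1
--             y = y2 - y1
--             squared_distance = x ** 2 + y ** 2
--
--             triangles_count += points_by_distances[squared_distance]
--
--             previous_vectors_xy_product_values = abs(x * SHIFT + y)
--             if previous_vectors_xy_product_values in opposite_vectors_xy_product: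
--                 triangles_count -= 1
--             else:
--                 opposite_vectors_xy_product.add(previous_vectors_xy_product_values)
--
--             points_by_distances[squared_distance] += 1
--
--     return triangles_count
-- ===== SOURCE B (Python) =====
-- SHIFT = 2 * 10 ** 9 + 1
--
-- def _equal_pairs(sorted_vals):
--     # number of equal pairs in a sorted list, by run scan
--     pairs = 0
--     run = 0
--     prev = None
--     for v in sorted_vals:
--         if v == prev:
--             run += 1
--             pairs += run
--         else:
--             run = 0
--             prev = v
--     return pairs
--
-- def _adjacent_dups(sorted_vals):
--     # len - number_of_distinct, on a sorted list
--     return sum(1 for a, b in zip(sorted_vals, sorted_vals[1:]) if a == b)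
--
-- def triangles(points):
--     total = 0
--     for x1, y1 in points:
--         dists = sorted((x2 - x1) ** 2 + (y2 - y1) ** 2 for x2, y2 in points)
--         vecs = sorted(abs((x2 - x1) * SHIFT + (y2 - y1)) for x2, y2 in points)
--         total += _equal_pairs(dists) - _adjacent_dups(vecs)
--     return total
-- ===== Notes on version B (the rewrite author's own statement) =====
-- stated objective: alternative
-- what changed: The hash-based grouping (a defaultdict of distance counts and a seen-vector set with an incremental tally inside the inner loop) is replaced by sort-then-scan: per vertex the squared-distance list and the |x*SHIFT+y| list are sorted, equal pairs are counted by a run scan over the sorted distances, and duplicates by counting equal adjacent entries of the sorted vector keys.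
import Mathlib
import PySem

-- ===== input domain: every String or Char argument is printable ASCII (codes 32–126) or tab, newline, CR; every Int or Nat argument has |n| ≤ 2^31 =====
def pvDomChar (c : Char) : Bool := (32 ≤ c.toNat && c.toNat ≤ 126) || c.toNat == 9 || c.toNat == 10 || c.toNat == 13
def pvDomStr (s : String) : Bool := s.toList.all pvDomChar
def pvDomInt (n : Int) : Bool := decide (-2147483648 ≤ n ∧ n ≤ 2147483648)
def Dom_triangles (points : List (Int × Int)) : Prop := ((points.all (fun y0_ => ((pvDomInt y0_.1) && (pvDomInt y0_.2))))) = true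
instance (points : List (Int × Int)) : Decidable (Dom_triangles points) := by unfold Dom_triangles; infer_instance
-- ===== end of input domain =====

-- B replaces A's hash-based grouping (defaultdict of distance counts + seen-vector set with an
-- incremental tally) by sort-then-scan: per vertex it sorts the squared-distance and vector-key
-- lists and counts equal pairs / adjacent duplicates by linear scans. Alternative; no speed claim.

-- SHIFT = 2 * 10 ** 9 + 1 (module constant used by both programs)
def pvSHIFT : Int := 2 * 10 ^ 9 + 1

-- ===== PORT A =====
-- inner loop of A: state = (opposite_vectors_xy_product, points_by_distances, triangles_count)
def trianglesStepA (x1 y1 : Int) (st : PySem.Set Int × PySem.Dict Int Int × Int)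
    (q : Int × Int) : PySem.Set Int × PySem.Dict Int Int × Int :=
  let x := q.1 - x1
  let y := q.2 - y1
  let sq := x ^ 2 + y ^ 2
  let a1 := st.2.2 + st.2.1.getD sq 0
  let v := |x * pvSHIFT + y|
  let sa : PySem.Set Int × Int :=
    if PySem.Set.contains st.1 v then (st.1, a1 - 1) else (PySem.Set.add st.1 v, a1)
  (sa.1, st.2.1.insert sq (st.2.1.getD sq 0 + 1), sa.2)

def triangles (points : List (Int × Int)) : Int :=
  points.foldl (fun acc p =>
    (points.foldl (trianglesStepA p.1 p.2) (PySem.Set.empty, PySem.Dict.empty, acc)).2.2)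
    0

-- ===== PORT B =====
-- _equal_pairs: run scan over a sorted list; state = (prev, run, pairs)
def pairAux : Option Int → Int → Int → List Int → Int
  | _, _, pairs, [] => pairs
  | prev, run, pairs, v :: t =>
    if prev = some v then pairAux prev (run + 1) (pairs + (run + 1)) t
    else pairAux (some v) 0 pairs t

def equalPairs (l : List Int) : Int := pairAux none 0 0 l

-- _adjacent_dups: sum(1 for a, b in zip(vals, vals[1:]) if a == b); vals[1:] = drop 1 (exact, index ≥ 0)
def adjacentDups (l : List Int) : Int := ((l.zip (l.drop 1)).countP (fun ab => ab.1 == ab.2) : Int)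

def triangles_alt (points : List (Int × Int)) : Int :=
  points.foldl (fun total p =>
    let dists := PySem.List.sorted (points.map (fun q => (q.1 - p.1) ^ 2 + (q.2 - p.2) ^ 2)) (fun x => x) false
    let vecs := PySem.List.sorted (points.map (fun q => |(q.1 - p.1) * pvSHIFT + (q.2 - p.2)|)) (fun x => x) false
    total + equalPairs dists - adjacentDups vecs) 0

-- ===== PRECONDITION & SPEC =====
def Spec_triangles (points : List (Int × Int)) (out : Int) : Prop := out = triangles_alt points
instance (points : List (Int × Int)) (out : Int) : Decidable (Spec_triangles points out) := by unfold Spec_triangles; infer_instance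

-- ===== CLAIM (what is proved, stated in full; the proofs are below) =====
def Claim_equal_triangles : Prop := ∀ (points : List (Int × Int)), Dom_triangles points → Spec_triangles points (triangles points)

-- ===== LEMMAS AND PROOFS =====

-- C c = c*(c-1) // 2
def pvC (c : Int) : Int := PySem.Int.floordiv (c * (c - 1)) 2

theorem pvC_succ (c : Int) : pvC (c + 1) = pvC c + c := by
  unfold pvC
  rw [PySem.Int.floordiv_eq_ediv_of_pos (by norm_num),
      PySem.Int.floordiv_eq_ediv_of_pos (by norm_num)]
  have h : (c + 1) * (c + 1 - 1) = c * (c - 1) + c * 2 := by ring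
  rw [h, Int.add_mul_ediv_right _ _ (by norm_num)]

-- sum of F over the multiset of group sizes of xs
def pvS (F : Int → Int) (xs : List Int) : Int :=
  ((PySem.Set.ofList xs).map (fun k => F ((xs.count k : Nat) : Int))).sum

theorem sum_map_congr_except {s : List Int} (hnd : s.Nodup) (x : Int)
    (f g : Int → Int) (hfg : ∀ k, k ≠ x → f k = g k) :
    (s.map f).sum = (s.map g).sum + (if x ∈ s then f x - g x else 0) := by
  induction s with
  | nil => simp
  | cons h t ih =>
    rcases List.nodup_cons.mp hnd with ⟨hht, hnt⟩
    by_cases hx : h = x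
    · subst hx
      have hmap : t.map f = t.map g := by
        apply List.map_congr_left
        intro k hk
        exact hfg k (fun hkh => hht (hkh ▸ hk))
      have hxt : h ∉ t := hht
      simp only [List.map_cons, List.sum_cons, List.mem_cons, hmap]
      simp [hxt]
      ring
    · have := ih hnt
      simp only [List.map_cons, List.sum_cons, List.mem_cons]
      rw [hfg h hx, this]
      have hne : ¬ x = h := fun hh => hx hh.symm
      by_cases hxt : x ∈ t <;> simp [hxt, hne] <;> try ring

theorem pvS_append (F : Int → Int) (xs : List Int) (x : Int) :
    pvS F (xs ++ [x]) = pvS F xs +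
      (if x ∈ xs then F ((xs.count x : Nat) + 1) - F (xs.count x) else F 1) := by
  unfold pvS
  rw [PySem.Set.ofList_append_singleton]
  have hcount : ∀ k : Int, k ≠ x → ((xs ++ [x]).count k : Int) = (xs.count k : Int) := by
    intro k hk
    have h1 : [x].count k = 0 := by
      simp [List.count_singleton]
      exact fun h => hk h.symm
    simp [List.count_append, h1]
  have hcx : ((xs ++ [x]).count x : Int) = (xs.count x : Int) + 1 := by
    simp [List.count_append]
  by_cases hx : x ∈ xs
  · have hmem : x ∈ PySem.Set.ofList xs := by
      rw [PySem.Set.mem_ofList]; exact hx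
    rw [PySem.Set.add_of_mem hmem]
    have := sum_map_congr_except (PySem.Set.nodup_ofList xs) x
      (fun k => F ((xs ++ [x]).count k)) (fun k => F (xs.count k))
      (fun k hk => congrArg F (hcount k hk))
    rw [this]
    simp [hmem, hcx, hx]
  · have hnmem : x ∉ PySem.Set.ofList xs := by
      rw [PySem.Set.mem_ofList]; exact hx
    have hadd : PySem.Set.add (PySem.Set.ofList xs) x = PySem.Set.ofList xs ++ [x] :=
      PySem.Set.add_of_not_mem hnmem
    have hmap : (PySem.Set.ofList xs).map (fun k => F ((xs ++ [x]).count k))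
        = (PySem.Set.ofList xs).map (fun k => F (xs.count k)) := by
      apply List.map_congr_left
      intro k hk
      have hkx : k ≠ x := fun h => hnmem (h ▸ hk)
      exact congrArg F (hcount k hkx)
    have hc0 : (xs.count x : Int) = 0 := by
      simp [List.count_eq_zero_of_not_mem hx]
    rw [hadd]
    simp only [List.map_append, List.sum_append, List.map_cons, List.map_nil,
      List.sum_cons, List.sum_nil, hmap]
    rw [hcx, hc0]
    simp [hx]

-- the deduplicated list of a permutation is a permutation of the deduplicated list
theorem ofList_perm {l l' : List Int} (h : l.Perm l') :
    (PySem.Set.ofList l).Perm (PySem.Set.ofList l') := by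
  rw [List.perm_ext_iff_of_nodup (PySem.Set.nodup_ofList l) (PySem.Set.nodup_ofList l')]
  intro a
  rw [PySem.Set.mem_ofList, PySem.Set.mem_ofList]
  exact h.mem_iff

theorem pvS_perm (F : Int → Int) {l l' : List Int} (h : l.Perm l') :
    pvS F l = pvS F l' := by
  unfold pvS
  have h1 : (PySem.Set.ofList l).map (fun k => F ((l.count k : Nat) : Int))
      = (PySem.Set.ofList l).map (fun k => F ((l'.count k : Nat) : Int)) := by
    apply List.map_congr_left
    intro k _
    rw [h.count_eq]
  rw [h1]
  exact ((ofList_perm h).map _).sum_eq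

theorem pvS_cons (F : Int → Int) (x : Int) (t : List Int) :
    pvS F (x :: t) = pvS F t +
      (if x ∈ t then F ((t.count x : Nat) + 1) - F (t.count x) else F 1) := by
  rw [pvS_perm F (List.perm_append_singleton x t).symm, pvS_append]

theorem pvS_cons_pvC (x : Int) (t : List Int) :
    pvS pvC (x :: t) = pvS pvC t + ((t.count x : Nat) : Int) := by
  rw [pvS_cons]
  by_cases hx : x ∈ t
  · rw [if_pos hx, pvC_succ]; ring
  · rw [if_neg hx, List.count_eq_zero_of_not_mem hx]
    simp [pvC, PySem.Int.floordiv]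

theorem pvS_id (xs : List Int) : pvS (fun v => v) xs = xs.length := by
  induction xs with
  | nil => simp [pvS]
  | cons x t ih =>
    rw [pvS_cons, ih]
    by_cases hx : x ∈ t <;> simp [hx] <;> ring

-- pvS of (c ↦ c − 1) is length minus number of distinct values
theorem pvS_sub_one (xs : List Int) :
    pvS (fun c => c - 1) xs = (xs.length : Int) - ((PySem.Set.ofList xs).length : Int) := by
  have h : pvS (fun c => c - 1) xs = pvS (fun v => v) xs - ((PySem.Set.ofList xs).length : Int) := by
    unfold pvS
    induction PySem.Set.ofList xs with
    | nil => simp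
    | cons h t ih => simp only [List.map_cons, List.sum_cons, List.length_cons, ih]; push_cast; ring
  rw [h, pvS_id]

-- run scan over a sorted tail, entering with prev = p and run counter r
theorem pairAux_sorted (l : List Int) : ∀ (p r acc : Int),
    l.Pairwise (· ≤ ·) → (∀ x ∈ l, p ≤ x) →
    pairAux (some p) r acc l = acc + pvS pvC l + ((l.count p : Nat) : Int) * (r + 1) := by
  induction l with
  | nil => intro p r acc _ _; simp [pairAux, pvS]
  | cons x t ih =>
    intro p r acc hsort hge
    have hts : t.Pairwise (· ≤ ·) := (List.pairwise_cons.mp hsort).2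
    have htx : ∀ y ∈ t, x ≤ y := (List.pairwise_cons.mp hsort).1
    by_cases hpx : p = x
    · subst hpx
      have : pairAux (some p) r acc (p :: t) = pairAux (some p) (r + 1) (acc + (r + 1)) t := by
        simp [pairAux]
      rw [this, ih p (r + 1) (acc + (r + 1)) hts htx, pvS_cons_pvC]
      simp [List.count_cons]
      push_cast
      ring
    · have : pairAux (some p) r acc (x :: t) = pairAux (some x) 0 acc t := by
        simp [pairAux, hpx]
      rw [this, ih x 0 acc hts htx, pvS_cons_pvC]
      have hplt : p < x := lt_of_le_of_ne (hge x (List.mem_cons_self)) hpx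
      have hc0 : (x :: t).count p = 0 := by
        rw [List.count_eq_zero]
        intro hp
        rcases List.mem_cons.mp hp with h | h
        · exact hpx h
        · exact absurd (htx p h) (not_le.mpr hplt)
      rw [hc0]
      push_cast
      ring

theorem equalPairs_sorted (l : List Int) (hsort : l.Pairwise (· ≤ ·)) :
    equalPairs l = pvS pvC l := by
  cases l with
  | nil => simp [equalPairs, pairAux, pvS]
  | cons h t =>
    have h1 : equalPairs (h :: t) = pairAux (some h) 0 0 t := by
      simp [equalPairs, pairAux]
    rw [h1, pairAux_sorted t h 0 0 (List.pairwise_cons.mp hsort).2 (List.pairwise_cons.mp hsort).1,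
        pvS_cons_pvC]
    ring

-- adjacent-duplicate scan over a sorted tail following the value p
theorem adjacentDups_cons (l : List Int) : ∀ p : Int,
    l.Pairwise (· ≤ ·) → (∀ x ∈ l, p ≤ x) →
    adjacentDups (p :: l) = pvS (fun c => c - 1) l + (if p ∈ l then 1 else 0) := by
  induction l with
  | nil => intro p _ _; simp [adjacentDups, pvS]
  | cons x t ih =>
    intro p hsort hge
    have hts : t.Pairwise (· ≤ ·) := (List.pairwise_cons.mp hsort).2
    have htx : ∀ y ∈ t, x ≤ y := (List.pairwise_cons.mp hsort).1
    have hstep : adjacentDups (p :: x :: t)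
        = (if p = x then 1 else 0) + adjacentDups (x :: t) := by
      simp only [adjacentDups, List.drop_succ_cons, List.drop_zero, List.zip_cons_cons,
        List.countP_cons]
      by_cases hpx : p = x <;> simp [hpx] <;> push_cast <;> ring
    rw [hstep, ih x hts htx]
    have hScons : pvS (fun c => c - 1) (x :: t)
        = pvS (fun c => c - 1) t + (if x ∈ t then 1 else 0) := by
      rw [pvS_cons]
      by_cases hx : x ∈ t <;> simp [hx]
    rw [hScons]
    by_cases hpx : p = x
    · subst hpx
      simp
      ring
    · have hplt : p < x := lt_of_le_of_ne (hge x (List.mem_cons_self)) hpx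
      have hpt : p ∉ x :: t := by
        intro hp
        rcases List.mem_cons.mp hp with h | h
        · exact hpx h
        · exact absurd (htx p h) (not_le.mpr hplt)
      simp [hpx, hpt]

theorem adjacentDups_sorted (l : List Int) (hsort : l.Pairwise (· ≤ ·)) :
    adjacentDups l = (l.length : Int) - ((PySem.Set.ofList l).length : Int) := by
  cases l with
  | nil => simp [adjacentDups]
  | cons h t =>
    rw [adjacentDups_cons t h (List.pairwise_cons.mp hsort).2 (List.pairwise_cons.mp hsort).1]
    have h2 : pvS (fun c => c - 1) (h :: t)
        = pvS (fun c => c - 1) t + (if h ∈ t then 1 else 0) := by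
      rw [pvS_cons]
      by_cases hx : h ∈ t <;> simp [hx]
    rw [← h2, pvS_sub_one]

-- per-vertex inner loop of A, closed form (as in the streaming tally)
theorem innerA_spec (x1 y1 : Int) (l : List (Int × Int)) (a : Int) :
    l.foldl (trianglesStepA x1 y1) (PySem.Set.empty, PySem.Dict.empty, a)
      = (PySem.Set.ofList (l.map (fun q => |(q.1 - x1) * pvSHIFT + (q.2 - y1)|)),
         PySem.Dict.counter (l.map (fun q => (q.1 - x1) ^ 2 + (q.2 - y1) ^ 2)),
         a + pvS pvC (l.map (fun q => (q.1 - x1) ^ 2 + (q.2 - y1) ^ 2))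
           - (l.length : Int)
           + ((PySem.Set.ofList (l.map (fun q => |(q.1 - x1) * pvSHIFT + (q.2 - y1)|))).length : Int)) := by
  induction l using List.reverseRecOn with
  | nil =>
    refine Prod.ext rfl (Prod.ext rfl ?_)
    simp [pvS]
  | append_singleton l p ih =>
    rw [List.foldl_append, ih]
    simp only [List.foldl_cons, List.foldl_nil, trianglesStepA, List.map_append,
      List.map_cons, List.map_nil]
    set sq := (p.1 - x1) ^ 2 + (p.2 - y1) ^ 2 with hsq
    set v := |(p.1 - x1) * pvSHIFT + (p.2 - y1)| with hvv
    set sqs := l.map (fun q => (q.1 - x1) ^ 2 + (q.2 - y1) ^ 2) with hsqs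
    set vecs := l.map (fun q => |(q.1 - x1) * pvSHIFT + (q.2 - y1)|) with hvecs
    have hdict : PySem.Dict.counter (sqs ++ [sq])
        = (PySem.Dict.counter sqs).insert sq ((PySem.Dict.counter sqs).getD sq 0 + 1) := by
      rw [PySem.Dict.counter_append_singleton]
      rfl
    have hS : pvS pvC (sqs ++ [sq]) = pvS pvC sqs + ((sqs.count sq : Nat) : Int) := by
      rw [pvS_append]
      by_cases hx : sq ∈ sqs
      · rw [if_pos hx, pvC_succ]; ring
      · rw [if_neg hx, List.count_eq_zero_of_not_mem hx]
        simp [pvC, PySem.Int.floordiv]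
    have hgetD : (PySem.Dict.counter sqs).getD sq 0 = ((sqs.count sq : Nat) : Int) :=
      PySem.Dict.getD_counter sqs sq
    by_cases hv : v ∈ vecs
    · have hmem : v ∈ PySem.Set.ofList vecs := (PySem.Set.mem_ofList _ _).mpr hv
      have hcont : PySem.Set.contains (PySem.Set.ofList vecs) v = true :=
        (PySem.Set.contains_iff _ _).mpr hmem
      have hset : PySem.Set.ofList (vecs ++ [v]) = PySem.Set.ofList vecs := by
        rw [PySem.Set.ofList_append_singleton, PySem.Set.add_of_mem hmem]
      rw [hset, hdict, hS]
      simp only [hcont, if_true, hgetD, List.length_append, List.length_cons,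
        List.length_nil, Prod.mk.injEq]
      refine ⟨trivial, trivial, ?_⟩
      push_cast
      ring
    · have hnmem : v ∉ PySem.Set.ofList vecs := fun h => hv ((PySem.Set.mem_ofList _ _).mp h)
      have hcont : PySem.Set.contains (PySem.Set.ofList vecs) v = false := by
        rw [← Bool.not_eq_true]
        exact fun h => hnmem ((PySem.Set.contains_iff _ _).mp h)
      have hset : PySem.Set.ofList (vecs ++ [v]) = PySem.Set.ofList vecs ++ [v] := by
        rw [PySem.Set.ofList_append_singleton, PySem.Set.add_of_not_mem hnmem]
      rw [hset, hdict, hS]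
      simp only [hcont, Bool.false_eq_true, if_false, hgetD, List.length_append,
        List.length_cons, List.length_nil, Prod.mk.injEq]
      refine ⟨PySem.Set.add_of_not_mem hnmem, trivial, ?_⟩
      push_cast
      ring

-- ===== VERDICT (by name: the statement is the Claim_ definition above) =====
theorem triangles_spec : Claim_equal_triangles := by
  intro points _
  unfold Spec_triangles triangles triangles_alt
  have hstep : (fun (acc : Int) (p : Int × Int) =>
      (points.foldl (trianglesStepA p.1 p.2) (PySem.Set.empty, PySem.Dict.empty, acc)).2.2)
      = (fun (total : Int) (p : Int × Int) =>
          let dists := PySem.List.sorted (points.map (fun q => (q.1 - p.1) ^ 2 + (q.2 - p.2) ^ 2)) (fun x => x) false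
          let vecs := PySem.List.sorted (points.map (fun q => |(q.1 - p.1) * pvSHIFT + (q.2 - p.2)|)) (fun x => x) false
          total + equalPairs dists - adjacentDups vecs) := by
    funext acc p
    show _ = (let dists := PySem.List.sorted (points.map (fun q => (q.1 - p.1) ^ 2 + (q.2 - p.2) ^ 2)) (fun x => x) false
              let vecs := PySem.List.sorted (points.map (fun q => |(q.1 - p.1) * pvSHIFT + (q.2 - p.2)|)) (fun x => x) false
              acc + equalPairs dists - adjacentDups vecs)
    rw [innerA_spec p.1 p.2 points acc]
    set sqs := points.map (fun q => (q.1 - p.1) ^ 2 + (q.2 - p.2) ^ 2) with hsqs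
    set vecs := points.map (fun q => |(q.1 - p.1) * pvSHIFT + (q.2 - p.2)|) with hvecs
    simp only []
    have hpd : (PySem.List.sorted sqs (fun x => x) false).Pairwise (· ≤ ·) := by
      have := PySem.List.sorted_pairwise (xs := sqs) (key := fun x => x)
      simpa using this
    have hpv : (PySem.List.sorted vecs (fun x => x) false).Pairwise (· ≤ ·) := by
      have := PySem.List.sorted_pairwise (xs := vecs) (key := fun x => x)
      simpa using this
    have hpermd : (PySem.List.sorted sqs (fun x => x) false).Perm sqs :=
      PySem.List.sorted_perm sqs (fun x => x) false
    have hpermv : (PySem.List.sorted vecs (fun x => x) false).Perm vecs :=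
      PySem.List.sorted_perm vecs (fun x => x) false
    rw [equalPairs_sorted _ hpd, adjacentDups_sorted _ hpv,
        pvS_perm pvC hpermd, hpermv.length_eq, (ofList_perm hpermv).length_eq]
    have hlen : vecs.length = points.length := List.length_map _
    rw [hlen]
    ring
  rw [hstep]
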